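-- pv_equiv track=rewrite | github.com/zofialuther/CS8395-08-Paper1-updated | data/translated-code/pseudo-to-python/python/Truncatable-primes.py | truncatableprime
-- ===== SOURCE A (Python) =====
-- def primes(n):
--     multiples = set()
--     prime = []
--     for i in range(2, n+1):
--         if i not in multiples:
--             prime.append(i)
--             multiples.update(set(range(i*i, n+1, i)))
--     return prime
--
-- def truncatableprime(n):
--     primelist = [str(x) for x in reversed(primes(n))]
--     primeset = set(primelist)
--     for num in primelist:
--         alltruncs = set([num[i:] for i in range(len(num))])
--         if alltruncs.issubset(primeset):
--             truncateleft = int(num)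
--             break
--     for num in primelist:
--         alltruncs = set([num[:i+1] for i in range(len(num))])
--         if alltruncs.issubset(primeset):
--             truncateright = int(num)
--             break
--     return truncateleft, truncateright
-- ===== SOURCE B (Python) =====
-- def primes(n):
--     multiples = set()
--     prime = []
--     for i in range(2, n+1):
--         if i not in multiples:
--             prime.append(i)
--             multiples.update(set(range(i*i, n+1, i)))
--     return prime
--
-- def truncatableprime(n):
--     plist = [str(p) for p in primes(n)]
--     pset = set(plist)
--
--     def left_ok(s):
--         return s in pset and (len(s) == 1 or left_ok(s[1:]))
--
--     def right_ok(s):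
--         return s in pset and (len(s) == 1 or right_ok(s[:-1]))
--
--     tl = tr = None
--     for s in plist:
--         if left_ok(s):
--             tl = s
--         if right_ok(s):
--             tr = s
--     return int(tl), int(tr)
-- ===== Notes on version B (the rewrite author's own statement) =====
-- stated objective: alternative
-- what changed: Instead of scanning the primes largest-first and building a set of all suffixes/prefixes of each candidate and testing it for subset-hood, B makes one forward pass over the primes and decides truncatability by a short-circuiting recursion on the string (prime iff in the prime set and its one-step truncation is truncatable), keeping the last match; the same sieve is kept.
import Mathlib
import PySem

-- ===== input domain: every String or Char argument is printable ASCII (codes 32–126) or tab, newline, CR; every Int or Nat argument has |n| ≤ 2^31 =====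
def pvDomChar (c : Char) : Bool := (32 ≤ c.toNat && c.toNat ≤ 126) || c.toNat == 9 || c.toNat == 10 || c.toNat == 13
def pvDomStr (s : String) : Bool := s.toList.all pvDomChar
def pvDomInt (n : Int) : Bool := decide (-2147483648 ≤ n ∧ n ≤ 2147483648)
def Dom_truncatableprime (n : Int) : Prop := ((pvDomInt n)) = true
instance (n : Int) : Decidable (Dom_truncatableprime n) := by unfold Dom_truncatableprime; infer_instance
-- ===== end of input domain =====

-- B replaces A's reversed scan with per-candidate suffix/prefix slice-sets and subset tests by a
-- single forward pass deciding truncatability via a recursion on the string; same return value.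
-- Note: every Python set in A and B is consumed by MEMBERSHIP only (its iteration order is never
-- observed), so those sets are ported as hash sets — exact for membership.

-- ===== PORT A =====
-- helper primes(n): sieve, shared module helper of A
def primesA (n : Int) : List Int :=
  ((PySem.List.pyRange 2 (n+1) 1).foldl
    (fun (st : Std.HashSet Int × List Int) i =>
      if !(st.1.contains i) then
        (st.1.insertMany (PySem.List.pyRange (i*i) (n+1) i), st.2 ++ [i])
      else st)
    ((∅ : Std.HashSet Int), [])).2

-- the two for-loops with break are List.find?; alltruncs.issubset(primeset) is "every element of
-- alltruncs is a member of primeset"; int(num) is ofStr?; when no candidate matches (n < 2) Python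
-- raises UnboundLocalError — excluded by Pre_, the port returns the default 0 there
def truncatableprime (n : Int) : Int × Int :=
  let primelist := ((primesA n).reverse).map PySem.Int.toStr
  let primeset : Std.HashSet String := Std.HashSet.ofList primelist
  let tl? := primelist.find? (fun num =>
    (PySem.Set.ofList ((PySem.List.pyRange 0 (PySem.Str.len num) 1).map
      (fun i => PySem.Str.slice num (some i) none))).all (fun x => primeset.contains x))
  let tr? := primelist.find? (fun num =>
    (PySem.Set.ofList ((PySem.List.pyRange 0 (PySem.Str.len num) 1).map
      (fun i => PySem.Str.slice num none (some (i+1))))).all (fun x => primeset.contains x))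
  ((tl?.bind PySem.Int.ofStr?).getD 0, (tr?.bind PySem.Int.ofStr?).getD 0)

-- ===== PORT B =====
-- helper primes(n): the same sieve helper, transliterated for B's module
def primesB (n : Int) : List Int :=
  ((PySem.List.pyRange 2 (n+1) 1).foldl
    (fun (st : Std.HashSet Int × List Int) i =>
      if !(st.1.contains i) then
        (st.1.insertMany (PySem.List.pyRange (i*i) (n+1) i), st.2 ++ [i])
      else st)
    ((∅ : Std.HashSet Int), [])).2

-- left_ok(s): s in pset and (len(s)==1 or left_ok(s[1:])); s[1:] is exactly the tail (char level)
def leftOkC (Q : Std.HashSet String) : List Char → Bool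
  | [] => false
  | c :: rest => Q.contains (String.ofList (c :: rest)) && (rest.isEmpty || leftOkC Q rest)

-- right_ok(s): s in pset and (len(s)==1 or right_ok(s[:-1])); s[:-1] is exactly dropLast (char level)
def rightOkC (Q : Std.HashSet String) : List Char → Bool
  | [] => false
  | c :: rest => Q.contains (String.ofList (c :: rest)) && (rest.isEmpty || rightOkC Q ((c :: rest).dropLast))
  termination_by l => l.length
  decreasing_by simp

-- the for-loop keeps the LAST matching string for each side; int(tl) at the end (None → port default 0)
def truncatableprime_alt (n : Int) : Int × Int :=
  let plist := (primesB n).map PySem.Int.toStr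
  let pset : Std.HashSet String := Std.HashSet.ofList plist
  let st := plist.foldl
    (fun (st : Option String × Option String) s =>
      (if leftOkC pset s.toList then some s else st.1,
       if rightOkC pset s.toList then some s else st.2))
    (none, none)
  ((st.1.bind PySem.Int.ofStr?).getD 0, (st.2.bind PySem.Int.ofStr?).getD 0)

-- ===== PRECONDITION & SPEC =====
-- A raises UnboundLocalError when no truncatable prime exists, i.e. exactly when n < 2
def Pre_truncatableprime (n : Int) : Prop := 2 ≤ n
instance (n : Int) : Decidable (Pre_truncatableprime n) := by unfold Pre_truncatableprime; infer_instance
def pvWitness_truncatableprime : Int := (10)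

def Spec_truncatableprime (n : Int) (out : Int × Int) : Prop := out = truncatableprime_alt n
instance (n : Int) (out : Int × Int) : Decidable (Spec_truncatableprime n out) := by unfold Spec_truncatableprime; infer_instance

-- ===== CLAIM (what is proved, stated in full; the proofs are below) =====
def Claim_equal_truncatableprime : Prop := ∀ (n : Int), Dom_truncatableprime n → Pre_truncatableprime n → Spec_truncatableprime n (truncatableprime n)

-- ===== LEMMAS AND PROOFS =====

theorem toDigitsCore_len (b : Nat) : ∀ (fuel n : Nat) (ds : List Char),
    ds.length ≤ (Nat.toDigitsCore b fuel n ds).length := by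
  intro fuel
  induction fuel with
  | zero => intro n ds; simp [Nat.toDigitsCore]
  | succ f ih =>
    intro n ds
    simp only [Nat.toDigitsCore]
    split
    · simp
    · have := ih (n / b) (Nat.digitChar (n % b) :: ds)
      simpa using Nat.le_trans (by simp) this

theorem toDigitsCore_succ_len (b f n : Nat) (ds : List Char) :
    ds.length < (Nat.toDigitsCore b (f+1) n ds).length := by
  simp only [Nat.toDigitsCore]
  split
  · simp
  · calc ds.length < (Nat.digitChar (n % b) :: ds).length := by simp
      _ ≤ _ := toDigitsCore_len b f _ _

theorem toDigits_ne_nil (b n : Nat) : Nat.toDigits b n ≠ [] := by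
  intro h
  have hlt := toDigitsCore_succ_len b n n []
  rw [show Nat.toDigitsCore b (n+1) n [] = Nat.toDigits b n from rfl, h] at hlt
  simp at hlt

theorem toChars_ne_nil (p : Int) : PySem.Int.toChars p ≠ [] := by
  unfold PySem.Int.toChars
  split
  · simp
  · exact toDigits_ne_nil 10 p.toNat

theorem bool_ext {a b : Bool} (h : a = true ↔ b = true) : a = b := by
  cases a <;> cases b <;> simp_all

-- a foldl that keeps the last match equals first-match on the reversed list
theorem foldl_lastMatch {α : Type} (f : α → Bool) :
    ∀ (l : List α) (a0 : Option α),
      l.foldl (fun a x => if f x then some x else a) a0 = (l.reverse.find? f).or a0 := by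
  intro l
  induction l with
  | nil => intro a0; simp
  | cons x t ih =>
    intro a0
    simp only [List.foldl_cons, List.reverse_cons, List.find?_append, ih]
    cases hfx : f x <;> cases ht : t.reverse.find? f <;> simp [List.find?, hfx, Option.or]

theorem foldl_pair_if {α : Type} (f g : α → Bool) :
    ∀ (l : List α) (b c : Option α),
      l.foldl (fun st x => (if f x then some x else st.1, if g x then some x else st.2)) (b, c)
        = (l.foldl (fun a x => if f x then some x else a) b,
           l.foldl (fun a x => if g x then some x else a) c) := by
  intro l
  induction l with
  | nil => intro b c; simp
  | cons x t ih => intro b c; simp [ih]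

theorem find?_congr' {α : Type} (p q : α → Bool) :
    ∀ (l : List α), (∀ x ∈ l, p x = q x) → l.find? p = l.find? q := by
  intro l
  induction l with
  | nil => intro _; rfl
  | cons x t ih =>
    intro h
    have hx := h x (by simp)
    simp only [List.find?]
    rw [hx]
    cases q x
    · exact ih (fun y hy => h y (by simp [hy]))
    · rfl

theorem leftOkC_cons (Q : Std.HashSet String) (c : Char) (rest : List Char) :
    leftOkC Q (c :: rest)
      = (Q.contains (String.ofList (c :: rest)) && (rest.isEmpty || leftOkC Q rest)) := rfl

theorem rightOkC_cons (Q : Std.HashSet String) (c : Char) (rest : List Char) :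
    rightOkC Q (c :: rest)
      = (Q.contains (String.ofList (c :: rest)) && (rest.isEmpty || rightOkC Q ((c :: rest).dropLast))) := by
  rw [rightOkC]

-- characterisation of B's recursive left check: all suffixes (as strings) lie in Q
theorem leftOkC_iff (Q : Std.HashSet String) :
    ∀ (l : List Char), l ≠ [] →
      (leftOkC Q l = true ↔ ∀ k < l.length, Q.contains (String.ofList (l.drop k)) = true) := by
  intro l
  induction l with
  | nil => intro h; exact absurd rfl h
  | cons c rest ih =>
    intro _
    rw [leftOkC_cons, Bool.and_eq_true, Bool.or_eq_true]
    constructor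
    · rintro ⟨h1, h2⟩ k hk
      cases k with
      | zero => simpa using h1
      | succ j =>
        rcases h2 with h2 | h2
        · have hr : rest = [] := by simpa using h2
          subst hr; simp at hk
        · have hrne : rest ≠ [] := by
            intro hr; subst hr; simp [leftOkC] at h2
          have := (ih hrne).mp h2 j (by simpa using hk)
          simpa using this
    · intro h
      refine ⟨by simpa using h 0 (by simp), ?_⟩
      cases rest with
      | nil => left; rfl
      | cons d t =>
        right
        refine (ih (by simp)).mpr ?_
        intro j hj
        simpa using h (j+1) (by simpa using Nat.succ_lt_succ hj)

-- characterisation of B's recursive right check: all prefixes (as strings) lie in Q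
theorem rightOkC_iff (Q : Std.HashSet String) :
    ∀ (m : Nat) (l : List Char), l.length = m → l ≠ [] →
      (rightOkC Q l = true ↔ ∀ k < l.length, Q.contains (String.ofList (l.take (k+1))) = true) := by
  intro m
  induction m using Nat.strong_induction_on with
  | _ m ih =>
    intro l hm hne
    cases l with
    | nil => exact absurd rfl hne
    | cons c rest =>
      subst hm
      rw [rightOkC_cons, Bool.and_eq_true, Bool.or_eq_true]
      cases rest with
      | nil =>
        constructor
        · rintro ⟨h1, _⟩ k hk
          have hk0 : k = 0 := by simpa using hk
          subst hk0
          simpa using h1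
        · intro h
          exact ⟨by simpa using h 0 (by simp), Or.inl rfl⟩
      | cons d t =>
        have hdl : (c :: d :: t).dropLast.length = (d :: t).length := by simp
        have hdne : (c :: d :: t).dropLast ≠ [] := by
          apply List.ne_nil_of_length_pos
          rw [hdl]; simp
        have ihr := ih ((d :: t).length) (by simp) ((c :: d :: t).dropLast) hdl hdne
        have htake : ∀ k, k + 1 ≤ (d :: t).length →
            (c :: d :: t).dropLast.take (k+1) = (c :: d :: t).take (k+1) := by
          intro k hk
          rw [List.dropLast_eq_take, List.take_take]
          congr 1
          simp only [List.length_cons] at hk ⊢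
          omega
        constructor
        · rintro ⟨h1, h2⟩ k hk
          rcases h2 with h2 | h2
          · simp at h2
          by_cases hke : k + 1 = (c :: d :: t).length
          · have heq : (c :: d :: t).take (k+1) = c :: d :: t := by
              rw [hke]; simp
            rw [heq]
            exact h1
          · have hk2 : k < (d :: t).length := by
              simp only [List.length_cons] at hk hke ⊢
              omega
            have := (ihr.mp h2) k (by rw [hdl]; exact hk2)
            rwa [htake k (by omega)] at this
        · intro h
          refine ⟨?_, Or.inr ?_⟩
          · have := h ((c :: d :: t).length - 1) (by simp)
            have heq : (c :: d :: t).take ((c :: d :: t).length - 1 + 1) = c :: d :: t := by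
              simp
            rwa [heq] at this
          · refine ihr.mpr ?_
            intro k hk
            rw [hdl] at hk
            rw [htake k (by omega)]
            exact h k (by simp only [List.length_cons] at hk ⊢; omega)

-- A's membership test over the suffix-slice set equals B's recursive left check
theorem predL_eq (PA PB : Std.HashSet String) (hPQ : ∀ x, PA.contains x = PB.contains x)
    (s : String) (hne : s.toList ≠ []) :
    ((PySem.Set.ofList ((PySem.List.pyRange 0 (PySem.Str.len s) 1).map
        (fun i => PySem.Str.slice s (some i) none))).all (fun x => PA.contains x))
      = leftOkC PB s.toList := by
  rcases hb : leftOkC PB s.toList with _ | _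
  · rw [Bool.eq_false_iff]
    intro hsub
    have hall : ∀ k < s.toList.length, PB.contains (String.ofList (s.toList.drop k)) = true := by
      intro k hk
      have hmem : String.ofList (s.toList.drop k) ∈
          (PySem.List.pyRange 0 (PySem.Str.len s) 1).map (fun i => PySem.Str.slice s (some i) none) := by
        refine List.mem_map.mpr ⟨(k : Int), ?_, ?_⟩
        · rw [PySem.List.mem_pyRange_one]
          constructor
          · exact Int.natCast_nonneg k
          · rw [PySem.Str.len_eq]; exact_mod_cast hk
        · show PySem.Str.slice s (some (k : Int)) none = _
          unfold PySem.Str.slice PySem.Chars.slice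
          rw [PySem.List.slice_from _ (Int.natCast_nonneg k)]
          simp
      have := (List.all_eq_true.mp hsub) _ ((PySem.Set.mem_ofList _ _).mpr hmem)
      rw [← hPQ]
      exact this
    exact absurd ((leftOkC_iff PB s.toList hne).mpr hall) (by simp [hb])
  · have hall := (leftOkC_iff PB s.toList hne).mp hb
    rw [List.all_eq_true]
    intro x hx
    have hx' := (PySem.Set.mem_ofList _ _).mp hx
    rcases List.mem_map.mp hx' with ⟨i, hi, hxi⟩
    rw [PySem.List.mem_pyRange_one] at hi
    have h0 : (0:Int) ≤ i := hi.1
    have hlt : i.toNat < s.toList.length := by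
      have := hi.2
      rw [PySem.Str.len_eq] at this
      omega
    have hxeq : x = String.ofList (s.toList.drop i.toNat) := by
      rw [← hxi]
      unfold PySem.Str.slice PySem.Chars.slice
      rw [PySem.List.slice_from _ h0]
    rw [hxeq, hPQ]
    exact hall i.toNat hlt

-- A's membership test over the prefix-slice set equals B's recursive right check
theorem predR_eq (PA PB : Std.HashSet String) (hPQ : ∀ x, PA.contains x = PB.contains x)
    (s : String) (hne : s.toList ≠ []) :
    ((PySem.Set.ofList ((PySem.List.pyRange 0 (PySem.Str.len s) 1).map
        (fun i => PySem.Str.slice s none (some (i+1))))).all (fun x => PA.contains x))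
      = rightOkC PB s.toList := by
  rcases hb : rightOkC PB s.toList with _ | _
  · rw [Bool.eq_false_iff]
    intro hsub
    have hall : ∀ k < s.toList.length, PB.contains (String.ofList (s.toList.take (k+1))) = true := by
      intro k hk
      have hmem : String.ofList (s.toList.take (k+1)) ∈
          (PySem.List.pyRange 0 (PySem.Str.len s) 1).map (fun i => PySem.Str.slice s none (some (i+1))) := by
        refine List.mem_map.mpr ⟨(k : Int), ?_, ?_⟩
        · rw [PySem.List.mem_pyRange_one]
          constructor
          · exact Int.natCast_nonneg k
          · rw [PySem.Str.len_eq]; exact_mod_cast hk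
        · show PySem.Str.slice s none (some ((k : Int) + 1)) = _
          unfold PySem.Str.slice PySem.Chars.slice
          rw [PySem.List.slice_to _ (by positivity)]
          rw [show (((k : Int) + 1)).toNat = k + 1 by omega]
      have := (List.all_eq_true.mp hsub) _ ((PySem.Set.mem_ofList _ _).mpr hmem)
      rw [← hPQ]
      exact this
    exact absurd ((rightOkC_iff PB s.toList.length s.toList rfl hne).mpr hall) (by simp [hb])
  · have hall := (rightOkC_iff PB s.toList.length s.toList rfl hne).mp hb
    rw [List.all_eq_true]
    intro x hx
    have hx' := (PySem.Set.mem_ofList _ _).mp hx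
    rcases List.mem_map.mp hx' with ⟨i, hi, hxi⟩
    rw [PySem.List.mem_pyRange_one] at hi
    have h0 : (0:Int) ≤ i := hi.1
    have hlt : i.toNat < s.toList.length := by
      have := hi.2
      rw [PySem.Str.len_eq] at this
      omega
    have hxeq : x = String.ofList (s.toList.take (i.toNat + 1)) := by
      rw [← hxi]
      unfold PySem.Str.slice PySem.Chars.slice
      rw [PySem.List.slice_to _ (by omega)]
      rw [show ((i : Int) + 1).toNat = i.toNat + 1 by omega]
    rw [hxeq, hPQ]
    exact hall i.toNat hlt

-- the whole equivalence, generalized over the (shared) prime list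
theorem main_eq (L : List Int) :
    (let primelist := (L.reverse).map PySem.Int.toStr
     let primeset : Std.HashSet String := Std.HashSet.ofList primelist
     let tl? := primelist.find? (fun num =>
       (PySem.Set.ofList ((PySem.List.pyRange 0 (PySem.Str.len num) 1).map
         (fun i => PySem.Str.slice num (some i) none))).all (fun x => primeset.contains x))
     let tr? := primelist.find? (fun num =>
       (PySem.Set.ofList ((PySem.List.pyRange 0 (PySem.Str.len num) 1).map
         (fun i => PySem.Str.slice num none (some (i+1))))).all (fun x => primeset.contains x))
     (((tl?.bind PySem.Int.ofStr?).getD 0 : Int), (tr?.bind PySem.Int.ofStr?).getD 0))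
    =
    (let plist := L.map PySem.Int.toStr
     let pset : Std.HashSet String := Std.HashSet.ofList plist
     let st := plist.foldl
       (fun (st : Option String × Option String) s =>
         (if leftOkC pset s.toList then some s else st.1,
          if rightOkC pset s.toList then some s else st.2))
       (none, none)
     (((st.1.bind PySem.Int.ofStr?).getD 0 : Int), (st.2.bind PySem.Int.ofStr?).getD 0)) := by
  simp only
  rw [foldl_pair_if, foldl_lastMatch, foldl_lastMatch]
  rw [← List.map_reverse]
  have hPQ : ∀ x, (Std.HashSet.ofList ((L.reverse).map PySem.Int.toStr)).contains x
      = (Std.HashSet.ofList (L.map PySem.Int.toStr)).contains x := by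
    intro x
    rw [Std.HashSet.contains_ofList, Std.HashSet.contains_ofList]
    apply bool_ext
    rw [List.contains_iff_mem, List.contains_iff_mem]
    constructor
    · intro h; rcases List.mem_map.mp h with ⟨p, hp, he⟩
      exact List.mem_map.mpr ⟨p, List.mem_reverse.mp hp, he⟩
    · intro h; rcases List.mem_map.mp h with ⟨p, hp, he⟩
      exact List.mem_map.mpr ⟨p, List.mem_reverse.mpr hp, he⟩
  have hne : ∀ s ∈ (L.reverse).map PySem.Int.toStr, s.toList ≠ [] := by
    intro s hs
    rcases List.mem_map.mp hs with ⟨p, _, he⟩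
    rw [← he, PySem.Int.toList_toStr]
    exact toChars_ne_nil p
  rw [find?_congr' _ (fun s => leftOkC (Std.HashSet.ofList (L.map PySem.Int.toStr)) s.toList)
        _ (fun s hs => predL_eq _ _ hPQ s (hne s hs)),
      find?_congr' _ (fun s => rightOkC (Std.HashSet.ofList (L.map PySem.Int.toStr)) s.toList)
        _ (fun s hs => predR_eq _ _ hPQ s (hne s hs))]
  simp

-- ===== VERDICT (by name: the statement is the Claim_ definition above) =====
theorem truncatableprime_spec : Claim_equal_truncatableprime := by
  intro n _ _
  unfold Spec_truncatableprime truncatableprime truncatableprime_alt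
  have hB : primesB n = primesA n := rfl
  rw [hB]
  exact main_eq (primesA n)
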